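-- pv_equiv track=rewrite | github.com/nicoleepp/AdventofCode2020 | Day 17/conway_cubes.py | new_grid
-- ===== SOURCE A (Python) =====
-- ACTIVE_STATE = "#"
--
-- INACTIVE_STATE = "."
--
-- def new_grid(cubes):
--     new_cubes = {}
--     for (x, y, z) in cubes:
--         for curr_x in (x-1, x, x+1):
--             for curr_y in (y-1, y, y+1):
--                 for curr_z in (z-1, z, z+1):
--
--                     state = cubes.get((curr_x, curr_y, curr_z), None)
--                     if state is None:
--                         new_cubes[(curr_x, curr_y, curr_z)] = INACTIVE_STATE
--                     elif state == ACTIVE_STATE: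
--                         new_cubes[(curr_x, curr_y, curr_z)] = ACTIVE_STATE
--                     else:
--                         new_cubes[(curr_x, curr_y, curr_z)] = INACTIVE_STATE
--     return new_cubes
-- ===== SOURCE B (Python) =====
-- ACTIVE_STATE = "#"
--
-- INACTIVE_STATE = "."
--
--
-- def _dilate(coords, shift):
--     # one-dimensional dilation along a single axis, keeping first-occurrence order
--     return list(dict.fromkeys(shift(c, d) for c in coords for d in (-1, 0, 1)))
--
--
-- def new_grid(cubes):
--     # Separable dilation: grow the region one axis at a time (3 offsets per pass)
--     # instead of enumerating all 27 neighbors of every cube at once.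
--     region = list(dict.fromkeys(cubes))
--     region = _dilate(region, lambda c, d: (c[0] + d, c[1], c[2]))
--     region = _dilate(region, lambda c, d: (c[0], c[1] + d, c[2]))
--     region = _dilate(region, lambda c, d: (c[0], c[1], c[2] + d))
--     return {c: ACTIVE_STATE if cubes.get(c) == ACTIVE_STATE else INACTIVE_STATE
--             for c in region}
-- ===== Notes on version B (the rewrite author's own statement) =====
-- stated objective: alternative
-- what changed: B computes the expanded region by separable dilation - three staged one-dimensional passes (3 offsets each along x, then y, then z, deduplicating after each pass) - instead of A's fused 27-neighbor triple loop, then assigns states in a final comprehension; the staged first-occurrence order provably equals A's insertion order.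
import Mathlib
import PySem

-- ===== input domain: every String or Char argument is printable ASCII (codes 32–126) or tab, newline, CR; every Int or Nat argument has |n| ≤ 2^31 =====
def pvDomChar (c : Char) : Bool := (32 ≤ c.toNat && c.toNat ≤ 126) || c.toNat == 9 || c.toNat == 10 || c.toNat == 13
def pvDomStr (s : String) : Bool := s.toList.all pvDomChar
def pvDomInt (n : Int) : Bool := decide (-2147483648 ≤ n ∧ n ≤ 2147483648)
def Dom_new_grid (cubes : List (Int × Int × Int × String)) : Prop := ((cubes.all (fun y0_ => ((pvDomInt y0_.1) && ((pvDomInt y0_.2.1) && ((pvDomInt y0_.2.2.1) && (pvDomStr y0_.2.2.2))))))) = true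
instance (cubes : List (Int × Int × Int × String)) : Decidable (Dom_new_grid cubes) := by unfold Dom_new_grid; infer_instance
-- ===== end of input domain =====

-- B replaces A's fused 27-neighbor triple loop by separable dilation: three staged
-- one-dimensional passes (3 offsets along x, then y, then z, deduplicating after each),
-- then a final state-assignment comprehension; same cost (objective: alternative).

-- ===== PORT A =====
-- cubes.get((cx,cy,cz), None): first-match association-list lookup (the dict has distinct keys)
def pvGetA (cubes : List (Int × Int × Int × String)) (c : Int × Int × Int) : Option String :=
  match cubes with
  | [] => none
  | (x, y, z, s) :: rest => if (x, y, z) = c then some s else pvGetA rest c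

-- new_cubes[(cx,cy,cz)] = v: overwrite in place, else append (Python dict assignment)
def pvSetA (d : List (Int × Int × Int × String)) (c : Int × Int × Int) (v : String) : List (Int × Int × Int × String) :=
  match d with
  | [] => [(c.1, c.2.1, c.2.2, v)]
  | (x, y, z, s) :: rest => if (x, y, z) = c then (x, y, z, v) :: rest else (x, y, z, s) :: pvSetA rest c v

def new_grid (cubes : List (Int × Int × Int × String)) : List (Int × Int × Int × String) :=
  cubes.foldl (fun nc e =>
    ([e.1 - 1, e.1, e.1 + 1] : List Int).foldl (fun nc cx =>
      ([e.2.1 - 1, e.2.1, e.2.1 + 1] : List Int).foldl (fun nc cy =>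
        ([e.2.2.1 - 1, e.2.2.1, e.2.2.1 + 1] : List Int).foldl (fun nc cz =>
          match pvGetA cubes (cx, cy, cz) with
          | none => pvSetA nc (cx, cy, cz) "."
          | some st => if st = "#" then pvSetA nc (cx, cy, cz) "#" else pvSetA nc (cx, cy, cz) ".") nc) nc) nc) []

-- ===== PORT B =====
-- cubes.get(c): first-match association-list lookup
def pvGetB (cubes : List (Int × Int × Int × String)) (c : Int × Int × Int) : Option String :=
  match cubes with
  | [] => none
  | (x, y, z, s) :: rest => if (x, y, z) = c then some s else pvGetB rest c

-- _dilate(coords, shift): one axis pass; dict.fromkeys = PySem.List.dedup (first occurrences)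
def pvDilate (coords : List (Int × Int × Int)) (shift : (Int × Int × Int) → Int → (Int × Int × Int)) : List (Int × Int × Int) :=
  PySem.List.dedup (coords.flatMap (fun c => ([(-1 : Int), 0, 1]).map (shift c)))

def new_grid_alt (cubes : List (Int × Int × Int × String)) : List (Int × Int × Int × String) :=
  let region0 := PySem.List.dedup (cubes.map (fun e => (e.1, e.2.1, e.2.2.1)))
  let region1 := pvDilate region0 (fun c d => (c.1 + d, c.2.1, c.2.2))
  let region2 := pvDilate region1 (fun c d => (c.1, c.2.1 + d, c.2.2))
  let region3 := pvDilate region2 (fun c d => (c.1, c.2.1, c.2.2 + d))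
  region3.map (fun c => (c.1, c.2.1, c.2.2, if pvGetB cubes c = some "#" then "#" else "."))

-- ===== PRECONDITION & SPEC =====
def Spec_new_grid (cubes : List (Int × Int × Int × String)) (out : List (Int × Int × Int × String)) : Prop := out = new_grid_alt cubes
instance (cubes : List (Int × Int × Int × String)) (out : List (Int × Int × Int × String)) : Decidable (Spec_new_grid cubes out) := by unfold Spec_new_grid; infer_instance

-- ===== CLAIM (what is proved, stated in full; the proofs are below) =====
def Claim_equal_new_grid : Prop := ∀ (cubes : List (Int × Int × Int × String)), Dom_new_grid cubes → Spec_new_grid cubes (new_grid cubes)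

-- ===== LEMMAS AND PROOFS =====

-- the state B assigns to a coordinate
def pvF (cubes : List (Int × Int × Int × String)) (c : Int × Int × Int) : String :=
  if pvGetB cubes c = some "#" then "#" else "."

-- the entry B emits for a coordinate
def pvG (cubes : List (Int × Int × Int × String)) (c : Int × Int × Int) : Int × Int × Int × String :=
  (c.1, c.2.1, c.2.2, pvF cubes c)

lemma pvGetA_eq_pvGetB (cubes : List (Int × Int × Int × String)) (c : Int × Int × Int) :
    pvGetA cubes c = pvGetB cubes c := by
  induction cubes with
  | nil => rfl
  | cons e rest ih =>
    obtain ⟨x, y, z, s⟩ := e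
    simp [pvGetA, pvGetB, ih]

lemma pvSet_key (cubes : List (Int × Int × Int × String)) (c : Int × Int × Int)
    (s : List (Int × Int × Int)) :
    pvSetA (s.map (pvG cubes)) c (pvF cubes c) = (PySem.Set.add s c).map (pvG cubes) := by
  induction s with
  | nil => simp [pvSetA, PySem.Set.add, PySem.Set.contains, pvG]
  | cons a t ih =>
    by_cases h : a = c
    · subst h
      simp [pvSetA, pvG, PySem.Set.add, PySem.Set.contains]
    · have hc : ¬ ((a.1, a.2.1, a.2.2) = c) := fun hk => h (by rw [← hk])
      simp only [List.map_cons, pvG, pvSetA, if_neg hc]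
      rw [ih]
      by_cases hm : c ∈ t
      · simp [PySem.Set.add, PySem.Set.contains, hm, Ne.symm h, pvG]
      · simp [PySem.Set.add, PySem.Set.contains, hm, Ne.symm h, pvG]

-- one iteration of A's innermost body, on a state of B's shape
lemma pvStep (cubes : List (Int × Int × Int × String)) (s : List (Int × Int × Int))
    (c : Int × Int × Int) :
    (match pvGetA cubes c with
     | none => pvSetA (s.map (pvG cubes)) c "."
     | some st => if st = "#" then pvSetA (s.map (pvG cubes)) c "#"
                  else pvSetA (s.map (pvG cubes)) c ".") =
    (PySem.Set.add s c).map (pvG cubes) := by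
  have hb : (match pvGetA cubes c with
     | none => pvSetA (s.map (pvG cubes)) c "."
     | some st => if st = "#" then pvSetA (s.map (pvG cubes)) c "#"
                  else pvSetA (s.map (pvG cubes)) c ".") =
      pvSetA (s.map (pvG cubes)) c (pvF cubes c) := by
    unfold pvF
    rw [← pvGetA_eq_pvGetB]
    cases hg : pvGetA cubes c with
    | none => simp
    | some st => by_cases hs : st = "#" <;> simp [hs]
  rw [hb, pvSet_key]

lemma pvLift {A B I : Type} (G : A → B) (F : B → I → B) (f : A → I → A)
    (h : ∀ s i, F (G s) i = G (f s i)) (l : List I) : ∀ (s : A), l.foldl F (G s) = G (l.foldl f s) := by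
  induction l with
  | nil => intro s; rfl
  | cons i t ih => intro s; rw [List.foldl_cons, List.foldl_cons, h, ih]

lemma pvOffsets (x : Int) :
    ([x - 1, x, x + 1] : List Int) = [(-1 : Int), 0, 1].map (fun d => x + d) := by
  norm_num [sub_eq_add_neg]

lemma pvInner27 (cubes : List (Int × Int × Int × String)) (x y z : Int)
    (s : List (Int × Int × Int)) :
    ([x - 1, x, x + 1] : List Int).foldl (fun nc cx =>
      ([y - 1, y, y + 1] : List Int).foldl (fun nc cy =>
        ([z - 1, z, z + 1] : List Int).foldl (fun nc cz =>
          match pvGetA cubes (cx, cy, cz) with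
          | none => pvSetA nc (cx, cy, cz) "."
          | some st => if st = "#" then pvSetA nc (cx, cy, cz) "#"
                       else pvSetA nc (cx, cy, cz) ".") nc) nc) (s.map (pvG cubes)) =
    ([(-1 : Int), 0, 1].foldl (fun s dx =>
      [(-1 : Int), 0, 1].foldl (fun s dy =>
        [(-1 : Int), 0, 1].foldl (fun s dz =>
          PySem.Set.add s (x + dx, y + dy, z + dz)) s) s) s).map (pvG cubes) := by
  rw [pvOffsets x, pvOffsets y, pvOffsets z]
  simp only [List.foldl_map]
  refine pvLift _ _ _ (fun t dx => ?_) _ _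
  refine pvLift _ _ _ (fun t dy => ?_) _ _
  exact pvLift _ _ _ (fun t dz => pvStep cubes t _) _ _

lemma pvTop (cubes E : List (Int × Int × Int × String)) (s : List (Int × Int × Int)) :
    E.foldl (fun nc e =>
      ([e.1 - 1, e.1, e.1 + 1] : List Int).foldl (fun nc cx =>
        ([e.2.1 - 1, e.2.1, e.2.1 + 1] : List Int).foldl (fun nc cy =>
          ([e.2.2.1 - 1, e.2.2.1, e.2.2.1 + 1] : List Int).foldl (fun nc cz =>
            match pvGetA cubes (cx, cy, cz) with
            | none => pvSetA nc (cx, cy, cz) "."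
            | some st => if st = "#" then pvSetA nc (cx, cy, cz) "#"
                         else pvSetA nc (cx, cy, cz) ".") nc) nc) nc) (s.map (pvG cubes)) =
    (E.foldl (fun s e =>
      [(-1 : Int), 0, 1].foldl (fun s dx =>
        [(-1 : Int), 0, 1].foldl (fun s dy =>
          [(-1 : Int), 0, 1].foldl (fun s dz =>
            PySem.Set.add s (e.1 + dx, e.2.1 + dy, e.2.2.1 + dz)) s) s) s) s).map (pvG cubes) :=
  pvLift (List.map (pvG cubes)) _ _
    (fun s e => pvInner27 cubes e.1 e.2.1 e.2.2.1 s) E s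

-- pointwise congruence for foldl
lemma pvFoldlCongr {A I : Type} (f g : A → I → A) (l : List I)
    (h : ∀ acc x, f acc x = g acc x) : ∀ (init : A), l.foldl f init = l.foldl g init := by
  induction l with
  | nil => intro init; rfl
  | cons x t ih => intro init; rw [List.foldl_cons, List.foldl_cons, h, ih]

-- updating a set with elements it already has is the identity
lemma pvUpdate_of_subset {α : Type} [BEq α] [LawfulBEq α] (s : PySem.Set α) (l : List α)
    (h : ∀ b ∈ l, b ∈ s) : PySem.Set.update s l = s := by
  induction l with
  | nil => rfl
  | cons x t ih =>
    have hx : PySem.Set.add s x = s := PySem.Set.add_of_mem (h x (by simp))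
    show PySem.Set.update (PySem.Set.add s x) t = s
    rw [hx]; exact ih (fun b hb => h b (by simp [hb]))

-- a loop of updates is one update by the flattened list
lemma pvFoldl_update {α β : Type} [BEq β] [LawfulBEq β] (g : α → List β) (l : List α) :
    ∀ (s : PySem.Set β), l.foldl (fun s x => PySem.Set.update s (g x)) s =
      PySem.Set.update s (l.flatMap g) := by
  induction l with
  | nil => intro s; rfl
  | cons x t ih =>
    intro s
    rw [List.foldl_cons, ih, List.flatMap_cons, PySem.Set.update_append]

-- deduplicating before a flatMap does not change the deduplicated result
lemma pvOfList_flatMap_ofList {α β : Type} [BEq α] [LawfulBEq α] [BEq β] [LawfulBEq β]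
    (g : α → List β) (L : List α) :
    PySem.Set.ofList ((PySem.Set.ofList L).flatMap g) = PySem.Set.ofList (L.flatMap g) := by
  induction L using List.reverseRecOn with
  | nil => rfl
  | append_singleton L x ih =>
    by_cases hx : x ∈ L
    · have h1 : PySem.Set.ofList (L ++ [x]) = PySem.Set.ofList L := by
        rw [PySem.Set.ofList_append_singleton,
          PySem.Set.add_of_mem ((PySem.Set.mem_ofList _ _).2 hx)]
      rw [h1, ih, List.flatMap_append, List.flatMap_singleton, PySem.Set.ofList_append]
      exact (pvUpdate_of_subset _ _ (fun b hb => by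
        exact (PySem.Set.mem_ofList _ _).2 (List.mem_flatMap.2 ⟨x, hx, hb⟩))).symm
    · have h1 : PySem.Set.ofList (L ++ [x]) = PySem.Set.ofList L ++ [x] := by
        rw [PySem.Set.ofList_append_singleton,
          PySem.Set.add_of_not_mem (fun h => hx ((PySem.Set.mem_ofList _ _).1 h))]
      rw [h1, List.flatMap_append, List.flatMap_append,
        PySem.Set.ofList_append, PySem.Set.ofList_append, ih]

-- A's 27-neighborhood of one cube, dx-major
def pvN27 (c : Int × Int × Int) : List (Int × Int × Int) :=
  [(-1 : Int), 0, 1].flatMap (fun dx =>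
    [(-1 : Int), 0, 1].flatMap (fun dy =>
      [(-1 : Int), 0, 1].map (fun dz => (c.1 + dx, c.2.1 + dy, c.2.2 + dz))))

-- A's set-accumulating fold is ofList of the flat 27-neighbor list
lemma pvSetFold_eq_ofList (E : List (Int × Int × Int × String)) :
    E.foldl (fun s e =>
      [(-1 : Int), 0, 1].foldl (fun s dx =>
        [(-1 : Int), 0, 1].foldl (fun s dy =>
          [(-1 : Int), 0, 1].foldl (fun s dz =>
            PySem.Set.add s (e.1 + dx, e.2.1 + dy, e.2.2.1 + dz)) s) s) s) [] =
    PySem.Set.ofList (E.flatMap (fun e => pvN27 (e.1, e.2.1, e.2.2.1))) := by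
  have hbody : ∀ (e : Int × Int × Int × String) (s : PySem.Set (Int × Int × Int)),
      [(-1 : Int), 0, 1].foldl (fun s dx =>
        [(-1 : Int), 0, 1].foldl (fun s dy =>
          [(-1 : Int), 0, 1].foldl (fun s dz =>
            PySem.Set.add s (e.1 + dx, e.2.1 + dy, e.2.2.1 + dz)) s) s) s =
      PySem.Set.update s (pvN27 (e.1, e.2.1, e.2.2.1)) := by
    intro e s
    simp only [← PySem.Set.update_map_eq_foldl_add, pvFoldl_update]
    rfl
  calc E.foldl (fun s e =>
        [(-1 : Int), 0, 1].foldl (fun s dx =>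
          [(-1 : Int), 0, 1].foldl (fun s dy =>
            [(-1 : Int), 0, 1].foldl (fun s dz =>
              PySem.Set.add s (e.1 + dx, e.2.1 + dy, e.2.2.1 + dz)) s) s) s) []
      = E.foldl (fun s e => PySem.Set.update s (pvN27 (e.1, e.2.1, e.2.2.1))) [] := by
        exact pvFoldlCongr _ _ _ (fun s e => hbody e s) []
    _ = PySem.Set.update [] (E.flatMap (fun e => pvN27 (e.1, e.2.1, e.2.2.1))) :=
        pvFoldl_update _ _ _
    _ = PySem.Set.ofList (E.flatMap (fun e => pvN27 (e.1, e.2.1, e.2.2.1))) := rfl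

-- B's three staged dilations produce the same deduplicated list
lemma pvStaged_eq (cubes : List (Int × Int × Int × String)) :
    pvDilate (pvDilate (pvDilate
        (PySem.List.dedup (cubes.map (fun e => (e.1, e.2.1, e.2.2.1))))
        (fun c d => (c.1 + d, c.2.1, c.2.2)))
        (fun c d => (c.1, c.2.1 + d, c.2.2)))
        (fun c d => (c.1, c.2.1, c.2.2 + d)) =
    PySem.Set.ofList (cubes.flatMap (fun e => pvN27 (e.1, e.2.1, e.2.2.1))) := by
  unfold pvDilate
  simp only [PySem.List.dedup_eq_ofList, pvOfList_flatMap_ofList]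
  rw [List.flatMap_map, List.flatMap_assoc, List.flatMap_assoc]
  rfl

-- ===== VERDICT (by name: the statement is the Claim_ definition above) =====
theorem new_grid_spec : Claim_equal_new_grid := by
  intro cubes _
  show new_grid cubes = new_grid_alt cubes
  unfold new_grid new_grid_alt
  have h := pvTop cubes cubes []
  simp only [List.map_nil] at h
  rw [h, pvSetFold_eq_ofList, ← pvStaged_eq]
  rfl
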